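-- pv_equiv track=rewrite | github.com/wangty-dut/IndusEnergyPred | LDG/get_feature.py | find_zero_intervals
-- ===== SOURCE A (Python) =====
-- def find_zero_intervals(arr):
--     # Get the length of the array
--     n = len(arr)
--     # List of stored results
--     results = []
--     # Mark whether it is within a 0 interval
--     in_zero_region = False
--     start_idx = -1
--     # Traversal array
--     for i in range(n):
--         if arr[i] == 0:
--             if not in_zero_region:
--                 # Start a new 0 interval
--                 start_idx = i
--                 in_zero_region = True
--         else:
--             if in_zero_region:
--                 # End the 0 interval
--                 end_idx = i
--                 length = end_idx - start_idx
--                 midpoint = start_idx + length // 2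
--                 results.append((midpoint, length))
--                 in_zero_region = False
--
--     # Process the last 0 interval
--     if in_zero_region:
--         end_idx = n
--         length = end_idx - start_idx
--         midpoint = start_idx + length // 2
--         results.append((midpoint, length))
--
--     return results
-- ===== SOURCE B (Python) =====
-- def find_zero_intervals(arr):
--     n = len(arr)
--     starts = [i for i in range(n) if arr[i] == 0 and (i == 0 or arr[i - 1] != 0)]
--     ends = [i + 1 for i in range(n) if arr[i] == 0 and (i == n - 1 or arr[i + 1] != 0)]
--     return [(s + (e - s) // 2, e - s) for s, e in zip(starts, ends)]
-- ===== Notes on version B (the rewrite author's own statement) =====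
-- stated objective: alternative
-- what changed: Replaces A's single-pass state machine (in-zero-region flag, start index, post-loop flush) with stateless staged passes: two comprehensions detect run boundaries (a start is a zero with nonzero predecessor, an end is a zero with nonzero successor), which are zipped to emit (start + len//2, len).
import Mathlib
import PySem

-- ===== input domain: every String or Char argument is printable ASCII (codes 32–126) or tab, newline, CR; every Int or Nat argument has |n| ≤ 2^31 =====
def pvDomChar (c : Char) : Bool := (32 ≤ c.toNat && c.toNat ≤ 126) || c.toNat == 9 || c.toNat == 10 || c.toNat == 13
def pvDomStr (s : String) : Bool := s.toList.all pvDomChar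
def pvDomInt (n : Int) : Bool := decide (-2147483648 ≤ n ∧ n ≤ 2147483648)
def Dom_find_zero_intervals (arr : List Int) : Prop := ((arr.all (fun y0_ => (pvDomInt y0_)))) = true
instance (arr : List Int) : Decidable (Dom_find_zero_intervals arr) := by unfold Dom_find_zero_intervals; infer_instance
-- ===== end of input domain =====

-- B replaces A's single-pass state machine (flag + start index + post-loop flush) by stateless
-- staged passes: two comprehensions detect run starts and run ends, which are zipped and emitted.

-- ===== PORT A =====
-- A's for-loop over i in range(n): state (results, in_zero_region, start_idx); the list tail plays range's remainder, i is the current index.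
def pvGoA : List Int → Int → List (Int × Int) → Bool → Int → List (Int × Int)
  | [], n, res, inz, start =>
      if inz then
        let length := n - start
        res ++ [(start + PySem.Int.floordiv length 2, length)]
      else res
  | a :: t, i, res, inz, start =>
      if a = 0 then
        if inz then pvGoA t (i + 1) res inz start
        else pvGoA t (i + 1) res true i
      else
        if inz then
          let length := i - start
          pvGoA t (i + 1) (res ++ [(start + PySem.Int.floordiv length 2, length)]) false start
        else pvGoA t (i + 1) res inz start

def find_zero_intervals (arr : List Int) : List (Int × Int) :=
  pvGoA arr 0 [] false (-1)

-- ===== PORT B =====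
-- Source B line by line: `starts` and `ends` are comprehensions over range(n) (filter, and for
-- `ends` the `i + 1` map); the result is a comprehension over zip(starts, ends).
-- arr[i-1] (resp. arr[i+1]) is only reached with 1 ≤ i (resp. i ≤ n-2), hence always in range;
-- getD's default 1 is never the compared value on those indices.
def find_zero_intervals_alt (arr : List Int) : List (Int × Int) :=
  let n := arr.length
  let starts := (List.range n).filter
    (fun i => arr.getD i 1 == 0 && (i == 0 || !(arr.getD (i - 1) 1 == 0)))
  let ends := ((List.range n).filter
    (fun i => arr.getD i 1 == 0 && (i == n - 1 || !(arr.getD (i + 1) 1 == 0)))).map (· + 1)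
  (starts.zip ends).map
    (fun p : Nat × Nat =>
      ((p.1 : Int) + PySem.Int.floordiv ((p.2 : Int) - (p.1 : Int)) 2, (p.2 : Int) - (p.1 : Int)))

-- ===== PRECONDITION & SPEC =====
def Spec_find_zero_intervals (arr : List Int) (out : List (Int × Int)) : Prop := out = find_zero_intervals_alt arr
instance (arr : List Int) (out : List (Int × Int)) : Decidable (Spec_find_zero_intervals arr out) := by unfold Spec_find_zero_intervals; infer_instance

-- ===== CLAIM (what is proved, stated in full; the proofs are below) =====
def Claim_equal_find_zero_intervals : Prop := ∀ (arr : List Int), Dom_find_zero_intervals arr → Spec_find_zero_intervals arr (find_zero_intervals arr)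

-- ===== LEMMAS AND PROOFS =====

-- Common yardstick: recursion over zero-runs. Both ports are proved equal to pvGoB.
def pvZrun : List Int → Nat
  | [] => 0
  | a :: t => if a = 0 then pvZrun t + 1 else 0

def pvGoB : List Int → Int → List (Int × Int)
  | [], _ => []
  | a :: t, i =>
      if a = 0 then
        let c : Int := 1 + (pvZrun t : Int)
        (i + PySem.Int.floordiv c 2, c) :: pvGoB (t.drop (pvZrun t)) (i + c)
      else pvGoB t (i + 1)
termination_by xs _ => xs.length
decreasing_by
  · simp only [List.length_drop, List.length_cons]; omega
  · simp

lemma pvZrun_drop (t : List Int) : ∀ b t', t.drop (pvZrun t) = b :: t' → b ≠ 0 := by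
  induction t with
  | nil => intro b t' h; simp at h
  | cons a t ih =>
      intro b t' h
      by_cases ha : a = 0
      · simp [pvZrun, ha] at h; exact ih b t' h
      · simp [pvZrun, ha] at h; rw [← h.1]; exact ha

-- ---- A-side: A's state machine equals pvGoB ----
lemma pvGo_inv (xs : List Int) :
    (∀ i res start, pvGoA xs i res false start = res ++ pvGoB xs i) ∧
    (∀ i res start,
      pvGoA xs i res true start =
        (let L : Int := (i + (pvZrun xs : Int)) - start
         let pair : Int × Int := (start + PySem.Int.floordiv L 2, L)
         match xs.drop (pvZrun xs) with
         | [] => res ++ [pair]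
         | _ :: t' => res ++ pair :: pvGoB t' (i + (pvZrun xs : Int) + 1))) := by
  induction xs with
  | nil =>
      constructor
      · intro i res start; simp [pvGoA, pvGoB]
      · intro i res start; simp [pvGoA, pvZrun]
  | cons a t ih =>
      obtain ⟨ihF, ihT⟩ := ih
      constructor
      · intro i res start
        by_cases h : a = 0
        · subst h
          rw [pvGoA.eq_def]
          simp only [Bool.false_eq_true, if_neg (by simp : ¬False)]
          rw [ihT (i + 1) res i]
          rw [pvGoB.eq_def]
          simp only []
          have hL : (i + 1 + (pvZrun t : Int)) - i = 1 + (pvZrun t : Int) := by ring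
          cases hd : t.drop (pvZrun t) with
          | nil => simp [hL, pvGoB]
          | cons b t' =>
              have hb : b ≠ 0 := pvZrun_drop t b t' hd
              simp only [hL]
              simp
              conv_rhs => rw [pvGoB.eq_def]
              simp only [if_neg hb]
              congr 1
              ring
        · rw [pvGoA.eq_def, pvGoB.eq_def]
          simp only [if_neg h]
          simpa using ihF (i + 1) res start
      · intro i res start
        by_cases h : a = 0
        · subst h
          rw [pvGoA.eq_def]
          simp only []
          rw [ihT (i + 1) res start]
          have hz : pvZrun ((0 : Int) :: t) = pvZrun t + 1 := by simp [pvZrun]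
          have eL : (i + 1 + (pvZrun t : Int)) - start = (i + (pvZrun ((0:Int) :: t) : Int)) - start := by
            rw [hz]; push_cast; ring
          have ei : i + 1 + (pvZrun t : Int) + 1 = i + (pvZrun ((0:Int) :: t) : Int) + 1 := by
            rw [hz]; push_cast; ring
          have hd : ((0 : Int) :: t).drop (pvZrun ((0:Int) :: t)) = t.drop (pvZrun t) := by
            rw [hz]; simp
          simp only [eL, ei, hd, if_true]
        · rw [pvGoA.eq_def]
          simp only [if_neg h]
          rw [ihF (i + 1) (res ++ [(start + PySem.Int.floordiv (i - start) 2, i - start)]) start]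
          have hz : pvZrun (a :: t) = 0 := by simp [pvZrun, h]
          simp [hz, List.append_assoc]

-- ---- B-side: recursive characterisations of the two boundary filters ----
def pvStarts : List Int → Bool → List Nat
  | [], _ => []
  | a :: t, prev => (if a == 0 && !prev then [0] else []) ++ (pvStarts t (a == 0)).map (· + 1)

def pvEnds : List Int → List Nat
  | [] => []
  | a :: t => (if a == 0 && !(t.getD 0 1 == 0) then [0] else []) ++ (pvEnds t).map (· + 1)

-- generalised starts predicate (prev = "previous element is zero")
def pvSP (arr : List Int) (prev : Bool) (i : Nat) : Bool :=
  arr.getD i 1 == 0 && !(if i = 0 then prev else arr.getD (i - 1) 1 == 0)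

lemma pvStarts_filter (arr : List Int) (prev : Bool) :
    (List.range arr.length).filter (pvSP arr prev) = pvStarts arr prev := by
  induction arr generalizing prev with
  | nil => simp [pvStarts]
  | cons a t ih =>
      rw [List.length_cons, List.range_succ_eq_map, List.filter_cons, List.filter_map]
      have h0 : pvSP (a :: t) prev 0 = (a == 0 && !prev) := by
        simp [pvSP]
      have hs : (pvSP (a :: t) prev) ∘ Nat.succ = pvSP t (a == 0) := by
        funext i
        cases i with
        | zero => simp [pvSP]
        | succ j => simp [pvSP]
      rw [h0, hs, ih]
      conv_rhs => rw [pvStarts.eq_def]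
      by_cases hb : (a == 0 && !prev) = true <;> simp [hb]

def pvEP (arr : List Int) (i : Nat) : Bool :=
  arr.getD i 1 == 0 && !(arr.getD (i + 1) 1 == 0)

lemma pvEnds_filter (arr : List Int) :
    (List.range arr.length).filter (pvEP arr) = pvEnds arr := by
  induction arr with
  | nil => simp [pvEnds]
  | cons a t ih =>
      rw [List.length_cons, List.range_succ_eq_map, List.filter_cons, List.filter_map]
      have h0 : pvEP (a :: t) 0 = (a == 0 && !(t.getD 0 1 == 0)) := by
        cases t <;> simp [pvEP]
      have hs : (pvEP (a :: t)) ∘ Nat.succ = pvEP t := by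
        funext i; simp [pvEP]
      have hmap : List.map Nat.succ (pvEnds t) = (pvEnds t).map (fun x => x + 1) :=
        List.map_congr_left fun x _ => rfl
      rw [h0, hs, ih]
      conv_rhs => rw [pvEnds.eq_def]
      by_cases hb : (a == 0 && !(t.getD 0 1 == 0)) = true
      · have hp : a = 0 ∧ ¬ t[0]?.getD 1 = 0 := by simpa [List.getD] using hb
        simp [hp, hmap]
      · have hp : ¬ (a = 0 ∧ ¬ t[0]?.getD 1 = 0) := by simpa [List.getD] using hb
        simp [hp, hmap]


-- the port's predicates agree with pvSP arr false / pvEP on range n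
lemma pvStarts_port (arr : List Int) :
    (List.range arr.length).filter
      (fun i => arr.getD i 1 == 0 && (i == 0 || !(arr.getD (i - 1) 1 == 0)))
      = pvStarts arr false := by
  rw [← pvStarts_filter arr false]
  apply List.filter_congr
  intro i _
  by_cases h : i = 0
  · simp [pvSP, h]
  · have hb : (i == 0) = false := by simpa using h
    simp [pvSP, h, hb]

lemma pvEnds_port (arr : List Int) :
    (List.range arr.length).filter
      (fun i => arr.getD i 1 == 0 && (i == arr.length - 1 || !(arr.getD (i + 1) 1 == 0)))
      = pvEnds arr := by
  rw [← pvEnds_filter arr]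
  apply List.filter_congr
  intro i hi
  rw [List.mem_range] at hi
  by_cases h : i = arr.length - 1
  · have hb : (i == arr.length - 1) = true := by simpa using h
    have hn : arr.getD (i + 1) 1 = 1 := by
      apply List.getD_eq_default
      omega
    simp only [List.getD] at hn
    simp [pvEP, hb, List.getD, hn]
  · have hb : (i == arr.length - 1) = false := by simpa using h
    simp [pvEP, hb]

-- shifting a shifted index list
lemma pvMapAdd (l : List Nat) (k : Nat) :
    (l.map (· + k)).map (· + 1) = l.map (· + (k + 1)) := by
  rw [List.map_map]
  exact List.map_congr_left fun x _ => rfl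

-- run lemmas for the recursive boundary lists
lemma pvStarts_cons (a : Int) (t : List Int) (prev : Bool) :
    pvStarts (a :: t) prev
      = (if a == 0 && !prev then [0] else []) ++ (pvStarts t (a == 0)).map (· + 1) := rfl

lemma pvEnds_cons (a : Int) (t : List Int) :
    pvEnds (a :: t)
      = (if a == 0 && !(t.getD 0 1 == 0) then [0] else []) ++ (pvEnds t).map (· + 1) := rfl

lemma pvStarts_true (t : List Int) :
    pvStarts t true = (pvStarts (t.drop (pvZrun t)) false).map (· + pvZrun t) := by
  induction t with
  | nil => simp [pvStarts]
  | cons a t ih =>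
      by_cases h : a = 0
      · subst h
        have hz : pvZrun ((0 : Int) :: t) = pvZrun t + 1 := by simp [pvZrun]
        rw [pvStarts_cons, hz]
        simp only [beq_self_eq_true, Bool.not_true, Bool.and_false, Bool.false_eq_true,
          if_false, List.nil_append, List.drop_succ_cons]
        rw [ih, pvMapAdd]
      · have hz : pvZrun (a :: t) = 0 := by simp [pvZrun, h]
        have hb : (a == 0) = false := by simpa using h
        rw [pvStarts_cons, hz]
        simp only [List.drop_zero]
        rw [pvStarts_cons]
        simp [hb]

lemma pvStarts_zero (t : List Int) :
    pvStarts ((0 : Int) :: t) false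
      = 0 :: (pvStarts (t.drop (pvZrun t)) false).map (· + (pvZrun t + 1)) := by
  rw [pvStarts_cons]
  simp only [beq_self_eq_true, Bool.not_false, Bool.and_self]
  rw [pvStarts_true, pvMapAdd]
  simp

lemma pvEnds_zero (t : List Int) :
    pvEnds ((0 : Int) :: t)
      = pvZrun t :: (pvEnds (t.drop (pvZrun t))).map (· + (pvZrun t + 1)) := by
  induction t with
  | nil => simp [pvEnds, pvZrun]
  | cons b t2 ih =>
      by_cases h : b = 0
      · subst h
        have hz : pvZrun ((0 : Int) :: t2) = pvZrun t2 + 1 := by simp [pvZrun]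
        rw [pvEnds_cons, ih, hz]
        simp
      · have hz : pvZrun ((b : Int) :: t2) = 0 := by simp [pvZrun, h]
        rw [pvEnds_cons, hz]
        simp [h]

lemma pvStarts_nonzero (a : Int) (t : List Int) (h : a ≠ 0) :
    pvStarts (a :: t) false = (pvStarts t false).map (· + 1) := by
  have hb : (a == 0) = false := by simpa using h
  rw [pvStarts_cons]
  simp [hb]

lemma pvEnds_nonzero (a : Int) (t : List Int) (h : a ≠ 0) :
    pvEnds (a :: t) = (pvEnds t).map (· + 1) := by
  have hb : (a == 0) = false := by simpa using h
  rw [pvEnds_cons]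
  simp [hb]

-- main B-side lemma: zipping starts with ends (inclusive indices) gives pvGoB, offset by i
lemma pvZip_goB (xs : List Int) (i : Int) :
    ((pvStarts xs false).zip (pvEnds xs)).map
      (fun p : Nat × Nat =>
        (i + (p.1 : Int) + PySem.Int.floordiv (((p.2 : Int) + 1) - (p.1 : Int)) 2,
         ((p.2 : Int) + 1) - (p.1 : Int)))
      = pvGoB xs i := by
  induction hn : xs.length using Nat.strong_induction_on generalizing xs i with
  | _ n ih =>
    cases xs with
    | nil => simp [pvStarts, pvEnds, pvGoB]
    | cons a t =>
        by_cases h : a = 0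
        · subst h
          rw [pvStarts_zero, pvEnds_zero, pvGoB.eq_def]
          simp only [if_true, List.zip_cons_cons, List.map_cons, List.cons.injEq]
          have hdec : (t.drop (pvZrun t)).length < n := by
            subst hn; simp only [List.length_drop, List.length_cons]; omega
          have htail := ih _ hdec (t.drop (pvZrun t)) (i + (1 + (pvZrun t : Int))) rfl
          constructor
          · simp only [Prod.mk.injEq]
            refine ⟨?_, ?_⟩ <;> (push_cast; ring_nf)
          · rw [List.zip_map, List.map_map, ← htail]
            apply List.map_congr_left
            intro p _
            simp only [Function.comp_apply, Prod.map_fst, Prod.map_snd, Prod.mk.injEq]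
            refine ⟨?_, ?_⟩ <;> (push_cast; ring_nf)
        · rw [pvStarts_nonzero a t h, pvEnds_nonzero a t h, pvGoB.eq_def]
          simp only [if_neg h]
          have hdec : t.length < n := by subst hn; simp
          rw [List.zip_map, List.map_map, ← ih _ hdec t (i + 1) rfl]
          apply List.map_congr_left
          intro p _
          simp only [Function.comp_apply, Prod.map_fst, Prod.map_snd, Prod.mk.injEq]
          refine ⟨?_, ?_⟩ <;> (push_cast; ring_nf)

-- ===== VERDICT (by name: the statement is the Claim_ definition above) =====
theorem find_zero_intervals_spec : Claim_equal_find_zero_intervals := by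
  intro arr _
  unfold Spec_find_zero_intervals find_zero_intervals find_zero_intervals_alt
  rw [(pvGo_inv arr).1 0 [] (-1)]
  simp only [List.nil_append, pvStarts_port, pvEnds_port]
  rw [← pvZip_goB arr 0, List.zip_map_right, List.map_map]
  apply List.map_congr_left
  intro p _
  simp only [Function.comp_apply, Prod.map_fst, Prod.map_snd, id_eq, Prod.mk.injEq]
  refine ⟨?_, ?_⟩ <;> (push_cast; ring_nf)
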